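/- GENERATED by farm/mkstatement.py from design/units.split.tsv — do not edit.
   THE SPLIT of the proof unit `start_decoder.C5` into `start_decoder.C5a`, `start_decoder.C5b`, `start_decoder.C5c`, `start_decoder.C5d`, `start_decoder.C5e`: the children's statements give the parent's
   UNCHANGED statement (so nothing above the parent — callers, compositions — is touched by the split). -/
import Vorbis.Spec.StartDecoderC5
import Vorbis.Spec.Units.start_decoder_C5
import Vorbis.Spec.Units.start_decoder_C5a
import Vorbis.Spec.Units.start_decoder_C5b
import Vorbis.Spec.Units.start_decoder_C5c
import Vorbis.Spec.Units.start_decoder_C5d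
import Vorbis.Spec.Units.start_decoder_C5e
namespace Vorbis.Spec.Splits
open X86 X86.User Asan

/-- The children of the split unit `start_decoder.C5` prove it, by `Vorbis.Spec.StartDecoder.SegC5.of_parts`. -/
theorem start_decoder_C5
    (h_start_decoder_C5a : Vorbis.Spec.start_decoder_C5a.Statement)
    (h_start_decoder_C5b : Vorbis.Spec.start_decoder_C5b.Statement)
    (h_start_decoder_C5c : Vorbis.Spec.start_decoder_C5c.Statement)
    (h_start_decoder_C5d : Vorbis.Spec.start_decoder_C5d.Statement)
    (h_start_decoder_C5e : Vorbis.Spec.start_decoder_C5e.Statement) :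
    Vorbis.Spec.start_decoder_C5.Statement := by
  intro Lay _hLay μ _hμ u₀ _hcode _h_asan_load1_noabort _h_asan_load4_noabort _h_setup_malloc _h_asan_store8_noabort _h_memcpy _h_setup_temp_free _h_asan_load8_noabort _h_asan_store1_noabort _h_error
  apply Vorbis.Spec.StartDecoder.SegC5.of_parts
  · exact h_start_decoder_C5a Lay _hLay μ _hμ u₀ _hcode _h_asan_load1_noabort _h_asan_load4_noabort _h_setup_malloc
  · exact h_start_decoder_C5b Lay _hLay μ _hμ u₀ _hcode _h_asan_load4_noabort _h_asan_store8_noabort _h_memcpy _h_error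
  · exact h_start_decoder_C5c Lay _hLay μ _hμ u₀ _hcode _h_asan_load4_noabort _h_setup_temp_free
  · exact h_start_decoder_C5d Lay _hLay μ _hμ u₀ _hcode _h_asan_load1_noabort _h_asan_load8_noabort _h_asan_store1_noabort
  · exact h_start_decoder_C5e Lay _hLay μ _hμ u₀ _hcode _h_asan_load1_noabort _h_asan_load4_noabort

end Vorbis.Spec.Splits
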